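-- pv_equiv track=rewrite | github.com/VTSTech/VTSTech-SRVEmu | ai_clean_rewrite/ea_protocol.py | _split_kv_tokens
-- ===== SOURCE A (Python) =====
-- def _split_kv_tokens(line: str) -> list:
--     """
--     Split a line into KEY=VALUE tokens, respecting quoted values.
--
--     E.g. 'ROOMS=1 USERS=1 RANKS=1 MESGS=1' -> ['ROOMS=1', 'USERS=1', ...]
--     E.g. 'VERS="PS2/XXX-Jul  2 2003"'       -> ['VERS="PS2/XXX-Jul  2 2003"']
--     """
--     tokens = []
--     current = []
--     in_quotes = False
--     for ch in line:
--         if ch == '"':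
--             in_quotes = not in_quotes
--             current.append(ch)
--         elif ch == ' ' and not in_quotes:
--             if current:
--                 tokens.append("".join(current))
--                 current = []
--         else:
--             current.append(ch)
--     if current:
--         tokens.append("".join(current))
--     return tokens
-- ===== SOURCE B (Python) =====
-- def _split_kv_tokens(line: str) -> list:
--     # Alternative decomposition: consume the string token-by-token with a
--     # quote-aware scanner instead of a char-by-char state machine with a flag.
--     tokens = []
--     s = line
--     while s:
--         if s[0] == ' ':
--             s = s[1:]
--             continue
--         tok, s = _take_token(s)
--         tokens.append(tok)
--     return tokens
--
--
-- def _take_token(s: str):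
--     """Read one token from the front of s (s non-empty, s[0] != ' ').
--
--     A quoted segment (up to the matching quote, or to the end of s if
--     unmatched) is consumed wholesale; otherwise one char at a time.
--     Returns (token, rest)."""
--     parts = []
--     i = 0
--     while i < len(s) and s[i] != ' ':
--         if s[i] == '"':
--             j = s.find('"', i + 1)
--             if j == -1:
--                 parts.append(s[i:])
--                 i = len(s)
--             else:
--                 parts.append(s[i:j + 1])
--                 i = j + 1
--         else:
--             parts.append(s[i])
--             i += 1
--     return ''.join(parts), s[i:]
-- ===== Notes on version B (the rewrite author's own statement) =====
-- stated objective: alternative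
-- what changed: Replaces the char-by-char state machine with an in_quotes flag by a token-at-a-time scanner: skip spaces, then a helper consumes one token, swallowing each quoted segment wholesale via find.
import Mathlib
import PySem

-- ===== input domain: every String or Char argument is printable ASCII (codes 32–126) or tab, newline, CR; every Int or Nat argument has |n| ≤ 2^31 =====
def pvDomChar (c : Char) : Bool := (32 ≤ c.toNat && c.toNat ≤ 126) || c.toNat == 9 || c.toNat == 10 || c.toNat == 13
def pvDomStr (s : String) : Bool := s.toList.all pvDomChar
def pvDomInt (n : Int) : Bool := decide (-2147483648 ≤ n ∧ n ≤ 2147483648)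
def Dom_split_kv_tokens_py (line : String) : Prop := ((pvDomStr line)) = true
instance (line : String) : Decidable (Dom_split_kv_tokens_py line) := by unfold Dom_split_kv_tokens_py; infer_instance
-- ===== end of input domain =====

-- B replaces A's char-by-char in_quotes state machine by a token-at-a-time scanner
-- (skip spaces; a helper consumes one token, swallowing quoted segments wholesale);
-- same return value, no speed claim (objective: alternative).

-- ===== PORT A =====
-- one step of A's for-loop over the characters; state = (tokens, current, in_quotes)
def pyStep (st : List String × List Char × Bool) (ch : Char) : List String × List Char × Bool :=
  let (tokens, current, in_quotes) := st
  if ch = '"' then (tokens, current ++ [ch], !in_quotes)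
  else if ch = ' ' ∧ in_quotes = false then
    (if current = [] then (tokens, current, in_quotes)
     else (tokens ++ [String.mk current], [], in_quotes))
  else (tokens, current ++ [ch], in_quotes)

-- A's trailing "if current: tokens.append(...)"
def pyFin : List String × List Char × Bool → List String
  | (tokens, current, _) => if current = [] then tokens else tokens ++ [String.mk current]

def split_kv_tokens_py (line : String) : List String :=
  pyFin (line.toList.foldl pyStep ([], [], false))

-- ===== PORT B =====
-- s.find('"', i+1): split at the first '"' (some (before, after)), none if absent
def altFindQuote : List Char → Option (List Char × List Char)
  | [] => none
  | c :: cs =>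
    if c = '"' then some ([], cs)
    else match altFindQuote cs with
         | none => none
         | some (a, b) => some (c :: a, b)

theorem altFindQuote_length : ∀ (cs a b : List Char),
    altFindQuote cs = some (a, b) → b.length < cs.length := by
  intro cs
  induction cs with
  | nil => intro a b h; simp [altFindQuote] at h
  | cons c cs ih =>
    intro a b h
    simp only [altFindQuote] at h
    split at h
    · simp only [Option.some.injEq, Prod.mk.injEq] at h
      obtain ⟨rfl, rfl⟩ := h
      simp
    · cases hq : altFindQuote cs with
      | none => rw [hq] at h; simp at h
      | some ab =>
        rw [hq] at h
        obtain ⟨a', b'⟩ := ab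
        simp at h
        have := ih a' b' hq
        simp [← h.2]; omega

-- the inner while-loop of _take_token; parts accumulated in order
def altTakeToken (acc : List Char) : List Char → List Char × List Char
  | [] => (acc, [])
  | c :: cs =>
    if c = ' ' then (acc, c :: cs)
    else if c = '"' then
      match hq : altFindQuote cs with
      | none => (acc ++ c :: cs, [])
      | some (a, b) => altTakeToken (acc ++ c :: a ++ ['"']) b
    else altTakeToken (acc ++ [c]) cs
  termination_by s => s.length
  decreasing_by
  all_goals simp
  have := altFindQuote_length cs a b hq; omega

theorem altTakeToken_rest_le : ∀ (n : Nat) (s : List Char), s.length ≤ n →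
    ∀ (acc : List Char), (altTakeToken acc s).2.length ≤ s.length := by
  intro n
  induction n with
  | zero =>
    intro s hs acc
    have : s = [] := by cases s <;> simp_all
    subst this; simp [altTakeToken]
  | succ n ih =>
    intro s hs acc
    cases s with
    | nil => simp [altTakeToken]
    | cons c cs =>
      simp only [List.length_cons] at hs
      rw [altTakeToken]
      by_cases h1 : c = ' '
      · simp [h1]
      · by_cases h2 : c = '"'
        · simp only [if_neg h1, if_pos h2]
          split
          · simp
          · rename_i a b hq
            have hb := altFindQuote_length cs a b hq
            have := ih b (by omega) (acc ++ c :: a ++ ['"'])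
            simp at this ⊢; omega
        · simp only [if_neg h1, if_neg h2]
          have := ih cs (by omega) (acc ++ [c])
          simp at this ⊢; omega

theorem altTakeToken_cons_rest_le (c : Char) (cs : List Char) (h : ¬ c = ' ') :
    (altTakeToken [] (c :: cs)).2.length ≤ cs.length := by
  rw [altTakeToken]
  simp only [if_neg h]
  by_cases h2 : c = '"'
  · simp only [if_pos h2]
    split
    · simp
    · rename_i a b hq
      have hb := altFindQuote_length cs a b hq
      have := altTakeToken_rest_le b.length b (le_refl _) ([] ++ c :: a ++ ['"'])
      omega
  · simp only [if_neg h2]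
    have := altTakeToken_rest_le cs.length cs (le_refl _) ([] ++ [c])
    omega

-- the outer while-loop of _split_kv_tokens
def altLoop : List Char → List String
  | [] => []
  | c :: cs =>
    if h : c = ' ' then altLoop cs
    else
      String.mk (altTakeToken [] (c :: cs)).1 :: altLoop (altTakeToken [] (c :: cs)).2
  termination_by s => s.length
  decreasing_by
  · simp
  · have := altTakeToken_cons_rest_le c cs h; simp; omega

def split_kv_tokens_py_alt (line : String) : List String := altLoop line.toList

-- ===== PRECONDITION & SPEC =====
def Spec_split_kv_tokens_py (line : String) (out : List String) : Prop := out = split_kv_tokens_py_alt line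
instance (line : String) (out : List String) : Decidable (Spec_split_kv_tokens_py line out) := by unfold Spec_split_kv_tokens_py; infer_instance

-- ===== CLAIM (what is proved, stated in full; the proofs are below) =====
def Claim_equal_split_kv_tokens_py : Prop := ∀ (line : String), Dom_split_kv_tokens_py line → Spec_split_kv_tokens_py line (split_kv_tokens_py line)

-- ===== LEMMAS AND PROOFS =====

-- proof-side description of what the fold produces from state (tokens, cur, false)
def altEmit (cur s : List Char) : List String :=
  if cur = [] then altLoop s
  else String.mk (altTakeToken cur s).1 :: altLoop (altTakeToken cur s).2

theorem altTakeToken_space (acc cs : List Char) :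
    altTakeToken acc (' ' :: cs) = (acc, ' ' :: cs) := by
  rw [altTakeToken]; simp

theorem altTakeToken_quote_none (acc cs : List Char) (hq : altFindQuote cs = none) :
    altTakeToken acc ('"' :: cs) = (acc ++ '"' :: cs, []) := by
  rw [altTakeToken]
  split
  · simp_all
  · split
    · split <;> simp_all
    · simp_all

theorem altTakeToken_quote_some (acc cs a b : List Char) (hq : altFindQuote cs = some (a, b)) :
    altTakeToken acc ('"' :: cs) = altTakeToken (acc ++ '"' :: a ++ ['"']) b := by
  rw [altTakeToken]
  split
  · simp_all
  · split
    · split <;> simp_all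
    · simp_all

theorem altTakeToken_other (acc : List Char) (c : Char) (cs : List Char)
    (h1 : ¬ c = ' ') (h2 : ¬ c = '"') :
    altTakeToken acc (c :: cs) = altTakeToken (acc ++ [c]) cs := by
  rw [altTakeToken]; simp [h1, h2]

theorem lquote : ∀ (cs : List Char) (tokens : List String) (cur : List Char), cur ≠ [] →
    pyFin (cs.foldl pyStep (tokens, cur, true)) =
      (match altFindQuote cs with
       | none => tokens ++ [String.mk (cur ++ cs)]
       | some (a, b) => pyFin (b.foldl pyStep (tokens, cur ++ a ++ ['"'], false))) := by
  intro cs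
  induction cs with
  | nil => intro tokens cur hcur; simp [altFindQuote, pyFin, hcur]
  | cons c cs ih =>
    intro tokens cur hcur
    by_cases hc : c = '"'
    · subst hc
      simp [altFindQuote, List.foldl_cons, pyStep]
    · have hstep : pyStep (tokens, cur, true) c = (tokens, cur ++ [c], true) := by
        simp [pyStep, hc]
      rw [List.foldl_cons, hstep, ih tokens (cur ++ [c]) (by simp)]
      simp only [altFindQuote, if_neg hc]
      cases hq : altFindQuote cs with
      | none => simp
      | some ab => obtain ⟨a, b⟩ := ab; simp

theorem main_aux : ∀ (n : Nat) (s : List Char), s.length ≤ n →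
    ∀ (tokens : List String) (cur : List Char),
      pyFin (s.foldl pyStep (tokens, cur, false)) = tokens ++ altEmit cur s := by
  intro n
  induction n with
  | zero =>
    intro s hs tokens cur
    have : s = [] := by cases s <;> simp_all
    subst this
    cases hcur : decide (cur = []) <;> simp_all [pyFin, altEmit, altLoop, altTakeToken]
  | succ n ih =>
    intro s hs tokens cur
    cases s with
    | nil =>
      cases hcur : decide (cur = []) <;> simp_all [pyFin, altEmit, altLoop, altTakeToken]
    | cons c cs =>
      simp only [List.length_cons] at hs
      by_cases hc : c = '"'
      · subst hc
        have hstep : pyStep (tokens, cur, false) '"' = (tokens, cur ++ ['"'], true) := by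
          simp [pyStep]
        rw [List.foldl_cons, hstep, lquote cs tokens (cur ++ ['"']) (by simp)]
        cases hq : altFindQuote cs with
        | none =>
          have htk := altTakeToken_quote_none cur cs hq
          by_cases hcur : cur = []
          · subst hcur; simp [altEmit, altLoop, htk]
          · simp [altEmit, hcur, altLoop, htk]
        | some ab =>
          obtain ⟨a, b⟩ := ab
          have hb : b.length ≤ n := by
            have := altFindQuote_length cs a b hq; omega
          have hne : cur ++ '"' :: a ++ ['"'] ≠ [] := by simp
          have hih := ih b hb tokens (cur ++ '"' :: a ++ ['"'])
          rw [altEmit, if_neg hne] at hih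
          have htk := altTakeToken_quote_some cur cs a b hq
          by_cases hcur : cur = []
          · subst hcur
            simp only [List.nil_append] at htk hih ⊢
            simp [altEmit, altLoop, htk]
            simpa [List.append_assoc] using hih
          · simp [altEmit, hcur, htk, List.append_assoc]
            simpa [List.append_assoc] using hih
      · by_cases hsp : c = ' '
        · subst hsp
          by_cases hcur : cur = []
          · subst hcur
            have hstep : pyStep (tokens, [], false) ' ' = (tokens, [], false) := by
              simp [pyStep]
            rw [List.foldl_cons, hstep, ih cs (by omega) tokens []]
            simp [altEmit, altLoop]
          · have hstep : pyStep (tokens, cur, false) ' ' =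
                (tokens ++ [String.mk cur], [], false) := by
              simp [pyStep, hcur]
            rw [List.foldl_cons, hstep, ih cs (by omega) (tokens ++ [String.mk cur]) []]
            have htk := altTakeToken_space cur cs
            simp [altEmit, hcur, htk, altLoop]
        · have hstep : pyStep (tokens, cur, false) c = (tokens, cur ++ [c], false) := by
            simp [pyStep, hc, hsp]
          rw [List.foldl_cons, hstep, ih cs (by omega) tokens (cur ++ [c])]
          have htk := altTakeToken_other cur c cs hsp hc
          by_cases hcur : cur = []
          · subst hcur
            simp only [List.nil_append] at htk ⊢
            simp [altEmit, altLoop, htk, hsp]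
          · simp [altEmit, hcur, htk, altLoop]

-- ===== VERDICT (by name: the statement is the Claim_ definition above) =====
theorem split_kv_tokens_py_spec : Claim_equal_split_kv_tokens_py := by
  intro line _
  unfold Spec_split_kv_tokens_py split_kv_tokens_py split_kv_tokens_py_alt
  rw [main_aux line.toList.length line.toList (le_refl _) [] []]
  simp [altEmit]
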